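-- pv_equiv track=rewrite | github.com/chartman15/code-samples | python/WholeGenome_OpenReadingFrame_Finder.py | findStopSites
-- ===== SOURCE A (Python) =====
-- CODON_SIZE = 3
--
-- def findStopSites(sequence_for_stop_sites):
--     index = 0
--     stop_codons = ["TAA", "TAG", "TGA"]
--     return_list = []
--     while index + CODON_SIZE - 1 < len(sequence_for_stop_sites):
--         if sequence_for_stop_sites[index: index + CODON_SIZE] in stop_codons:
--             return_list.append(index)
--         index += 1
--     return return_list
-- ===== SOURCE B (Python) =====
-- def findStopSites(sequence_for_stop_sites):
--     hits = []
--     for codon in ("TAA", "TAG", "TGA"):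
--         start = 0
--         while True:
--             i = sequence_for_stop_sites.find(codon, start)
--             if i == -1:
--                 break
--             hits.append(i)
--             start = i + 1
--     return sorted(hits)
-- ===== Notes on version B (the rewrite author's own statement) =====
-- stated objective: faster
-- what changed: Instead of one sliding-window pass testing each 3-char slice for membership in the codon list, B makes one repeated str.find search pass per stop codon (restarting at the last hit + 1 so overlapping hits are kept), collects all hit indices, and merges them with sorted().
import Mathlib
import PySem

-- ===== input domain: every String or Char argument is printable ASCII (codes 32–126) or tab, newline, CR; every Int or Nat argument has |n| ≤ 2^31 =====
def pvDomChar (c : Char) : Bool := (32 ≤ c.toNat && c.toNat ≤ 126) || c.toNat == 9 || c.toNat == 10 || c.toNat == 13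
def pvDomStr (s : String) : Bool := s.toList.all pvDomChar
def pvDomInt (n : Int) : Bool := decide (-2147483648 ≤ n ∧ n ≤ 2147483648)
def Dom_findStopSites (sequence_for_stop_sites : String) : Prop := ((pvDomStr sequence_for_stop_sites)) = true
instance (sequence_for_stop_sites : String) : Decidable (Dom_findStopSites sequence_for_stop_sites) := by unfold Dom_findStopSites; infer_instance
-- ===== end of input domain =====

-- B replaces A's single sliding-window membership loop by one repeated str.find search pass per
-- stop codon (restarting at hit+1) followed by sorted() — measurably faster (C-level search).

-- ===== PORT A =====
def pvCODON_SIZE : Nat := 3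

def pvStopCodons : List (List Char) := [['T','A','A'], ['T','A','G'], ['T','G','A']]

-- A's while loop: index walks up by 1 while index + CODON_SIZE - 1 < len(s)
def pvGoA (cs : List Char) (index : Nat) (return_list : List Int) : List Int :=
  if index + pvCODON_SIZE - 1 < cs.length then
    pvGoA cs (index + 1)
      (if PySem.List.slice cs (some (index : Int)) (some ((index : Int) + (pvCODON_SIZE : Int))) ∈ pvStopCodons
       then return_list ++ [(index : Int)] else return_list)
  else return_list
termination_by cs.length - index
decreasing_by simp [pvCODON_SIZE] at *; omega

def findStopSites (sequence_for_stop_sites : String) : List Int :=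
  pvGoA sequence_for_stop_sites.toList 0 []

-- ===== PORT B =====
-- B's inner 'while True: i = s.find(codon, start); if i == -1: break; hits.append(i); start = i + 1'.
-- The fuel argument (length+1) only makes the loop total; it is never exhausted, since start
-- strictly increases and find past the end returns -1.
def pvFindAllLoop (cs w : List Char) (fuel : Nat) (start : Nat) (hits : List Int) : List Int :=
  match fuel with
  | 0 => hits
  | fuel + 1 =>
    let i := PySem.Chars.findFrom cs w (start : Int)
    if i = -1 then hits
    else pvFindAllLoop cs w fuel (i.toNat + 1) (hits ++ [i])

-- B: for codon in ("TAA","TAG","TGA") accumulate hits, then return sorted(hits)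
def findStopSites_alt (sequence_for_stop_sites : String) : List Int :=
  let cs := sequence_for_stop_sites.toList
  let h1 := pvFindAllLoop cs ['T','A','A'] (cs.length + 1) 0 []
  let h2 := pvFindAllLoop cs ['T','A','G'] (cs.length + 1) 0 h1
  let h3 := pvFindAllLoop cs ['T','G','A'] (cs.length + 1) 0 h2
  PySem.List.sorted h3 (fun x => x)

-- ===== PRECONDITION & SPEC =====
def Spec_findStopSites (sequence_for_stop_sites : String) (out : List Int) : Prop := out = findStopSites_alt sequence_for_stop_sites
instance (sequence_for_stop_sites : String) (out : List Int) : Decidable (Spec_findStopSites sequence_for_stop_sites out) := by unfold Spec_findStopSites; infer_instance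

-- ===== CLAIM (what is proved, stated in full; the proofs are below) =====
def Claim_equal_findStopSites : Prop := ∀ (sequence_for_stop_sites : String), Dom_findStopSites sequence_for_stop_sites → Spec_findStopSites sequence_for_stop_sites (findStopSites sequence_for_stop_sites)

-- ===== LEMMAS AND PROOFS =====

-- the step-1 occurrence list of pattern w in cs, from position start on (reference function)
def pvOcc (cs w : List Char) (start : Nat) : List Int :=
  if h : start + w.length ≤ cs.length ∧ w ≠ [] then
    (if (cs.drop start).take w.length = w then [(start : Int)] else []) ++ pvOcc cs w (start + 1)
  else []
termination_by cs.length - start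
decreasing_by have := List.length_pos_of_ne_nil h.2; omega

-- the step-1 stop-site list of cs from position start on (reference function)
def pvAllStops (cs : List Char) (start : Nat) : List Int :=
  if _h : start + 3 ≤ cs.length then
    (if (cs.drop start).take 3 ∈ pvStopCodons then [(start : Int)] else []) ++ pvAllStops cs (start + 1)
  else []
termination_by cs.length - start
decreasing_by omega

theorem pvGoA_eq (cs : List Char) (index : Nat) (acc : List Int) :
    pvGoA cs index acc = acc ++ pvAllStops cs index := by
  fun_induction pvGoA cs index acc with
  | case1 index acc h ih =>
    have h3 : index + 3 ≤ cs.length := by simp [pvCODON_SIZE] at h; omega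
    have hs : PySem.List.slice cs (some (index : Int)) (some ((index : Int) + (pvCODON_SIZE : Int)))
        = (cs.drop index).take 3 := by
      rw [show ((pvCODON_SIZE : Int)) = ((3 : Nat) : Int) from rfl, PySem.List.slice_natCast_add]
    simp only [dite_eq_ite] at ih
    rw [ih]
    conv_rhs => rw [pvAllStops]
    rw [dif_pos h3, hs]
    by_cases hm : (cs.drop index).take 3 ∈ pvStopCodons
    · simp [hm]
    · simp [hm]
  | case2 index acc h =>
    have hn : ¬ index + 3 ≤ cs.length := by simp [pvCODON_SIZE] at h; omega
    rw [pvAllStops, dif_neg hn]; simp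

theorem pvOcc_cons (cs w : List Char) (start : Nat)
    (h : start + w.length ≤ cs.length) (hw : w ≠ []) :
    pvOcc cs w start
      = (if (cs.drop start).take w.length = w then [(start : Int)] else []) ++ pvOcc cs w (start + 1) := by
  rw [pvOcc, dif_pos ⟨h, hw⟩]

theorem pvOcc_cons3 (cs w : List Char) (start : Nat)
    (hw : w.length = 3) (h : start + 3 ≤ cs.length) :
    pvOcc cs w start
      = (if (cs.drop start).take 3 = w then [(start : Int)] else []) ++ pvOcc cs w (start + 1) := by
  have hne : w ≠ [] := by intro he; rw [he] at hw; simp at hw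
  rw [pvOcc_cons cs w start (by omega) hne, hw]

-- a prefix match at m fits inside cs
theorem pvPre_len (cs w : List Char) (m : Nat) (hw : w ≠ []) (hpre : w <+: cs.drop m) :
    m + w.length ≤ cs.length := by
  have h1 := hpre.length_le
  have h2 := List.length_pos_of_ne_nil hw
  simp [List.length_drop] at h1
  omega

theorem pvOcc_nil (cs w : List Char) (start : Nat)
    (h : ∀ j, start ≤ j → ¬ w <+: cs.drop j) : pvOcc cs w start = [] := by
  fun_induction pvOcc cs w start with
  | case1 start hc ih =>
    have hne : ¬ (cs.drop start).take w.length = w := by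
      intro he
      exact h start le_rfl (he ▸ List.take_prefix _ _)
    rw [if_neg hne, ih (fun j hj => h j (by omega))]
    rfl
  | case2 start hc => rfl

theorem pvOcc_no_infix (cs w : List Char) (start : Nat)
    (h : ¬ w <:+: cs.drop start) : pvOcc cs w start = [] := by
  refine pvOcc_nil cs w start (fun j hj hpre => h ?_)
  have hd : cs.drop j = (cs.drop start).drop (j - start) := by
    rw [List.drop_drop]; congr 1; omega
  rw [hd] at hpre
  have : PySem.Chars.isIn w (cs.drop start) = true :=
    (PySem.Chars.exists_prefix_drop_iff_isIn _ _).mp ⟨j - start, hpre⟩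
  exact (PySem.Chars.isIn_iff_infix _ _).mp this

theorem pvOcc_step (cs w : List Char) (hw : w ≠ []) :
    ∀ k start m, m - start = k → start ≤ m →
      (∀ j, start ≤ j → j < m → ¬ w <+: cs.drop j) → w <+: cs.drop m →
      pvOcc cs w start = (m : Int) :: pvOcc cs w (m + 1) := by
  intro k
  induction k with
  | zero =>
    intro start m hk hsm hmin hpre
    have hse : start = m := by omega
    subst hse
    have hlen : start + w.length ≤ cs.length := pvPre_len cs w start hw hpre
    rw [pvOcc_cons cs w start hlen hw,
        if_pos ((List.prefix_iff_eq_take.mp hpre).symm)]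
    rfl
  | succ k ih =>
    intro start m hk hsm hmin hpre
    have hlt : start < m := by omega
    have hlen : start + w.length ≤ cs.length := by
      have := pvPre_len cs w m hw hpre; omega
    have hne : ¬ (cs.drop start).take w.length = w := by
      intro he
      exact hmin start le_rfl hlt (he ▸ List.take_prefix _ _)
    rw [pvOcc_cons cs w start hlen hw, if_neg hne]
    exact ih (start + 1) m (by omega) (by omega) (fun j hj => hmin j (by omega)) hpre

theorem pvLoop_eq (cs w : List Char) (hw : w ≠ []) :
    ∀ fuel start hits, start ≤ cs.length → cs.length + 1 ≤ fuel + start →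
      pvFindAllLoop cs w fuel start hits = hits ++ pvOcc cs w start := by
  intro fuel
  induction fuel with
  | zero => intro start hits h1 h2; omega
  | succ fuel ih =>
    intro start hits h1 h2
    simp only [pvFindAllLoop]
    by_cases hi : PySem.Chars.findFrom cs w (start : Int) = -1
    · rw [if_pos hi]
      have hni : ¬ w <:+: cs.drop start :=
        (PySem.Chars.findFrom_natCast_eq_neg_one_iff cs w start h1).mp hi
      rw [pvOcc_no_infix cs w start hni, List.append_nil]
    · rw [if_neg hi]
      obtain ⟨hle, hpre, hmin⟩ := PySem.Chars.findFrom_natCast_spec cs w start h1 hi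
      set i := PySem.Chars.findFrom cs w (start : Int) with hidef
      set m := i.toNat with hmdef
      have him : i = (m : Int) := by
        have : (0 : Int) ≤ i := le_trans (by exact_mod_cast Nat.zero_le start) hle
        omega
      have hsm : start ≤ m := by omega
      have hml : m + w.length ≤ cs.length := pvPre_len cs w m hw hpre
      have hm1 : m + 1 ≤ cs.length := by
        have := List.length_pos_of_ne_nil hw; omega
      rw [ih (m + 1) (hits ++ [i]) hm1 (by omega)]
      rw [pvOcc_step cs w hw (m - start) start m rfl hsm hmin hpre, him]
      simp

theorem pvAllStops_lb (cs : List Char) (start : Nat) :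
    ∀ x ∈ pvAllStops cs start, (start : Int) ≤ x := by
  fun_induction pvAllStops cs start with
  | case1 start hc ih =>
    intro x hx
    rcases List.mem_append.mp hx with hx | hx
    · split at hx
      · simp at hx; omega
      · simp at hx
    · have := ih x hx; omega
  | case2 start hc => intro x hx; simp at hx

theorem pvAllStops_pw (cs : List Char) (start : Nat) :
    (pvAllStops cs start).Pairwise (· < ·) := by
  fun_induction pvAllStops cs start with
  | case1 start hc ih =>
    refine List.pairwise_append.mpr ⟨?_, ih, ?_⟩
    · split <;> simp
    · intro x hx y hy
      have hy' := pvAllStops_lb cs (start + 1) y hy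
      split at hx
      · simp at hx; subst hx; push_cast at hy' ⊢; omega
      · simp at hx
  | case2 start hc => simp

-- merging the three per-codon occurrence lists is a permutation of the stop-site list
theorem pvPerm (cs : List Char) (start : Nat) :
    (pvOcc cs ['T','A','A'] start ++ pvOcc cs ['T','A','G'] start ++ pvOcc cs ['T','G','A'] start).Perm
      (pvAllStops cs start) := by
  fun_induction pvAllStops cs start with
  | case1 start hc ih =>
    rw [pvOcc_cons3 cs ['T','A','A'] start rfl hc,
        pvOcc_cons3 cs ['T','A','G'] start rfl hc,
        pvOcc_cons3 cs ['T','G','A'] start rfl hc]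
    set win := (cs.drop start).take 3 with hwin
    by_cases h1 : win = ['T','A','A']
    · have h2 : ¬ win = ['T','A','G'] := by rw [h1]; decide
      have h3 : ¬ win = ['T','G','A'] := by rw [h1]; decide
      have hm : win ∈ pvStopCodons := by rw [h1]; decide
      simp only [if_pos h1, if_neg h2, if_neg h3, if_pos hm]
      simpa using ih.cons ((start : Int))
    · by_cases h2 : win = ['T','A','G']
      · have h3 : ¬ win = ['T','G','A'] := by rw [h2]; decide
        have hm : win ∈ pvStopCodons := by rw [h2]; decide
        simp only [if_neg h1, if_pos h2, if_neg h3, if_pos hm]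
        simp only [List.nil_append, List.append_assoc, List.cons_append]
        exact (List.perm_middle).trans
          (List.Perm.cons _ (by simpa [List.append_assoc] using ih))
      · by_cases h3 : win = ['T','G','A']
        · have hm : win ∈ pvStopCodons := by rw [h3]; decide
          simp only [if_neg h1, if_neg h2, if_pos h3, if_pos hm]
          simp only [List.nil_append, List.singleton_append]
          exact (List.perm_middle).trans (ih.cons _)
        · have hm : ¬ win ∈ pvStopCodons := by
            simp [pvStopCodons]; exact ⟨h1, h2, h3⟩
          simp only [if_neg h1, if_neg h2, if_neg h3, if_neg hm]
          simpa using ih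
  | case2 start hc =>
    have e1 : pvOcc cs ['T','A','A'] start = [] := by
      rw [pvOcc, dif_neg]; simp; omega
    have e2 : pvOcc cs ['T','A','G'] start = [] := by
      rw [pvOcc, dif_neg]; simp; omega
    have e3 : pvOcc cs ['T','G','A'] start = [] := by
      rw [pvOcc, dif_neg]; simp; omega
    simp [e1, e2, e3]

-- ===== VERDICT (by name: the statement is the Claim_ definition above) =====
theorem findStopSites_spec : Claim_equal_findStopSites := by
  intro s _
  unfold Spec_findStopSites findStopSites findStopSites_alt
  show pvGoA s.toList 0 [] =
    PySem.List.sorted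
      (pvFindAllLoop s.toList ['T','G','A'] (s.toList.length + 1) 0
        (pvFindAllLoop s.toList ['T','A','G'] (s.toList.length + 1) 0
          (pvFindAllLoop s.toList ['T','A','A'] (s.toList.length + 1) 0 []))) (fun x => x)
  have hfa : ∀ (w : List Char) (hits : List Int), w ≠ [] →
      pvFindAllLoop s.toList w (s.toList.length + 1) 0 hits = hits ++ pvOcc s.toList w 0 :=
    fun w hits hw => pvLoop_eq s.toList w hw (s.toList.length + 1) 0 hits (Nat.zero_le _) (by omega)
  rw [hfa _ _ (by simp), hfa _ _ (by simp), hfa _ _ (by simp)]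
  simp only [List.nil_append]
  rw [pvGoA_eq, List.nil_append]
  exact (PySem.List.sorted_eq_of_perm_of_pairwise_lt _ _ _ (pvPerm s.toList 0).symm
    (pvAllStops_pw s.toList 0)).symm
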